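-- pv_equiv track=rewrite | github.com/immanuelgiulea/jobsCanada | oasis_data.py | _group_core_competencies
-- ===== SOURCE A (Python) =====
-- from collections import defaultdict
--
-- def _group_core_competencies(rows: list[dict[str, str]]) -> dict[str, list[dict[str, str]]]:
--     grouped: dict[str, list[dict[str, str]]] = defaultdict(list)
--     for row in rows:
--         code = row.get("Code", "").strip()
--         competency = row.get("Core Competencies - English", "").strip()
--         statement = row.get("Competency Statements - English", "").strip()
--         if code and (competency or statement):
--             grouped[code].append(
--                 {
--                     "competency": competency or None,
--                     "statement": statement or None,
--                 }
--             )
--     return dict(grouped)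
-- ===== SOURCE B (Python) =====
-- def _clean(row):
--     code = row.get("Code", "").strip()
--     competency = row.get("Core Competencies - English", "").strip()
--     statement = row.get("Competency Statements - English", "").strip()
--     if code and (competency or statement):
--         return code, {"competency": competency or None, "statement": statement or None}
--     return None
--
--
-- def _group_core_competencies(rows: list[dict[str, str]]) -> dict[str, list[dict[str, str]]]:
--     kept = [p for p in map(_clean, rows) if p is not None]
--     return {c: [e for k, e in kept if k == c]
--             for c in dict.fromkeys(k for k, _ in kept)}
-- ===== Notes on version B (the rewrite author's own statement) =====
-- stated objective: alternative
-- what changed: Replaces the defaultdict accumulation loop by a filter-first pipeline: clean each row to an optional (code, entry) pair, then build the result with a dict comprehension over the first-occurrence-ordered distinct codes, collecting each group by a scan of the kept pairs.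
import Mathlib
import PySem

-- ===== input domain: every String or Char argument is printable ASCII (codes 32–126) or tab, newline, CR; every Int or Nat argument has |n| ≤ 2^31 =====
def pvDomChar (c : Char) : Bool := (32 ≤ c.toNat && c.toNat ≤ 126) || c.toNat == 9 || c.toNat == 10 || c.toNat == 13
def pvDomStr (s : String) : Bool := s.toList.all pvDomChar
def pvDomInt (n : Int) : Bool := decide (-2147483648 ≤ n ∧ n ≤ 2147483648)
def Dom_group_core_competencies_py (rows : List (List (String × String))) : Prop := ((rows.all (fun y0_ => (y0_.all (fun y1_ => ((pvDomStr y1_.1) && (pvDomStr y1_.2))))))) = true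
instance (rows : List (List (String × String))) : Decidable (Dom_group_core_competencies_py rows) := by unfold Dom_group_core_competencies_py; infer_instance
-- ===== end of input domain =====

-- B replaces A's defaultdict accumulation by a filter-first pipeline (clean rows to optional
-- (code, entry) pairs, then group over the first-occurrence-ordered distinct codes); alternative decomposition, not faster.

-- ===== PORT A =====
-- literal transliteration of A: a defaultdict(list) loop; grouped[code].append(e) is
-- Dict.modify code [] (· ++ [e]), exactly Python's defaultdict read-then-append; dict(grouped) = .items.
def group_core_competencies_py (rows : List (List (String × String))) : List (String × List (List (String × Option String))) :=
  (rows.foldl (fun (grouped : PySem.Dict String (List (List (String × Option String)))) row =>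
    let code := PySem.Str.strip ((PySem.Dict.mk row).getD "Code" "")
    let competency := PySem.Str.strip ((PySem.Dict.mk row).getD "Core Competencies - English" "")
    let statement := PySem.Str.strip ((PySem.Dict.mk row).getD "Competency Statements - English" "")
    if code ≠ "" ∧ (competency ≠ "" ∨ statement ≠ "") then
      grouped.modify code []
        (· ++ [[("competency", if competency = "" then none else some competency),
                ("statement", if statement = "" then none else some statement)]])
    else grouped) PySem.Dict.empty).items

-- ===== PORT B =====
-- _clean: the optional (code, entry) pair kept from a row
def pvClean (row : List (String × String)) : Option (String × List (String × Option String)) :=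
  let code := PySem.Str.strip ((PySem.Dict.mk row).getD "Code" "")
  let competency := PySem.Str.strip ((PySem.Dict.mk row).getD "Core Competencies - English" "")
  let statement := PySem.Str.strip ((PySem.Dict.mk row).getD "Competency Statements - English" "")
  if code ≠ "" ∧ (competency ≠ "" ∨ statement ≠ "") then
    some (code, [("competency", if competency = "" then none else some competency),
                 ("statement", if statement = "" then none else some statement)])
  else none

def group_core_competencies_py_alt (rows : List (List (String × String))) : List (String × List (List (String × Option String))) :=
  let kept := rows.filterMap pvClean
  (PySem.List.dedup (kept.map (·.1))).map
    (fun c => (c, (kept.filter (fun p => p.1 == c)).map (·.2)))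

-- ===== PRECONDITION & SPEC =====
def Spec_group_core_competencies_py (rows : List (List (String × String))) (out : List (String × List (List (String × Option String)))) : Prop := out = group_core_competencies_py_alt rows
instance (rows : List (List (String × String))) (out : List (String × List (List (String × Option String)))) : Decidable (Spec_group_core_competencies_py rows out) := by unfold Spec_group_core_competencies_py; infer_instance

-- ===== CLAIM (what is proved, stated in full; the proofs are below) =====
def Claim_equal_group_core_competencies_py : Prop := ∀ (rows : List (List (String × String))), Dom_group_core_competencies_py rows → Spec_group_core_competencies_py rows (group_core_competencies_py rows)

-- ===== LEMMAS AND PROOFS =====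

-- A's loop over rows is the grouping fold over the kept (code, entry) pairs
theorem pvFold_eq (rows : List (List (String × String)))
    (d : PySem.Dict String (List (List (String × Option String)))) :
    rows.foldl (fun grouped row =>
      let code := PySem.Str.strip ((PySem.Dict.mk row).getD "Code" "")
      let competency := PySem.Str.strip ((PySem.Dict.mk row).getD "Core Competencies - English" "")
      let statement := PySem.Str.strip ((PySem.Dict.mk row).getD "Competency Statements - English" "")
      if code ≠ "" ∧ (competency ≠ "" ∨ statement ≠ "") then
        grouped.modify code []
          (· ++ [[("competency", if competency = "" then none else some competency),
                  ("statement", if statement = "" then none else some statement)]])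
      else grouped) d
    = (rows.filterMap pvClean).foldl (fun d p => d.modify p.1 [] (· ++ [p.2])) d := by
  induction rows generalizing d with
  | nil => rfl
  | cons r rs ih =>
    simp only [List.foldl_cons, List.filterMap_cons]
    unfold pvClean
    dsimp only
    split_ifs with h <;> rw [ih] <;> rfl

-- ===== VERDICT (by name: the statement is the Claim_ definition above) =====
theorem group_core_competencies_py_spec : Claim_equal_group_core_competencies_py := by
  intro rows _
  show group_core_competencies_py rows = group_core_competencies_py_alt rows
  unfold group_core_competencies_py group_core_competencies_py_alt
  rw [pvFold_eq]
  set kept := rows.filterMap pvClean with hk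
  rw [PySem.Dict.items_eq_map_keys _ (by
        exact PySem.Dict.nodup_keys_foldl_modify_key kept (·.1) [] (fun d p => (· ++ [p.2])) _ PySem.Dict.nodup_keys_empty) []]
  rw [PySem.Dict.keys_foldl_modify_key]
  rw [PySem.Dict.keys_empty]
  show (PySem.Set.update [] (kept.map (·.1))).map _ = (PySem.List.dedup (kept.map (·.1))).map _
  rw [show PySem.Set.update ([] : List String) (kept.map (·.1)) = PySem.List.dedup (kept.map (·.1)) from by
    rw [PySem.List.dedup_eq_ofList, PySem.Set.ofList_eq_foldl]; rfl]
  apply List.map_congr_left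
  intro c _
  rw [PySem.Dict.getD_foldl_modify_append, PySem.Dict.getD_empty]
  simp
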